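-- pv_equiv track=rewrite | github.com/xu1718191411/AT_CODE_BEGINNER_SELECTION | CONTEXT_98/attention.py | calculate
-- ===== SOURCE A (Python) =====
-- def calculate(S):
--     SSS = []
--
--     totalENum = S.count("E")
--
--     for index, value in enumerate(S):
--         if index == 0:
--             obj = {}
--             if value == "W":
--                 obj.__setitem__("W", 1)
--                 obj.__setitem__("E", 0)
--             else:
--                 obj.__setitem__("E", 1)
--                 obj.__setitem__("W", 0)
--             SSS.append(obj)
--         else:
--             obj = {}
--             prevW = SSS[index - 1].__getitem__("W")
--             prevE = SSS[index - 1].__getitem__("E")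
--             if value == "W":
--                 obj.__setitem__("W", prevW + 1)
--                 obj.__setitem__("E", prevE)
--             else:
--                 obj.__setitem__("E", prevE + 1)
--                 obj.__setitem__("W", prevW)
--
--             SSS.append(obj)
--
--     resVal = len(S)
--     for index,value in enumerate(S):
--         if value == "W":
--             resVal = min(resVal,SSS[index].__getitem__("W") - 1 + totalENum - SSS[index].__getitem__("E"))
--         else:
--             resVal = min(resVal, SSS[index].__getitem__("W") + totalENum - SSS[index].__getitem__("E"))
--
--     return resVal
-- ===== SOURCE B (Python) =====
-- def calculate(S):
--     totalE = S.count("E")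
--     res = len(S)
--     w = 0
--     e = 0
--     for ch in S:
--         if ch == "W":
--             w += 1
--             res = min(res, w - 1 + totalE - e)
--         else:
--             e += 1
--             res = min(res, w + totalE - e)
--     return res
-- ===== Notes on version B (the rewrite author's own statement) =====
-- stated objective: simpler
-- what changed: Replaced the two passes and the list of per-index prefix-count dicts with a single pass that maintains two running integer counters and folds the minimum on the fly; no table is built.
import Mathlib
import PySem

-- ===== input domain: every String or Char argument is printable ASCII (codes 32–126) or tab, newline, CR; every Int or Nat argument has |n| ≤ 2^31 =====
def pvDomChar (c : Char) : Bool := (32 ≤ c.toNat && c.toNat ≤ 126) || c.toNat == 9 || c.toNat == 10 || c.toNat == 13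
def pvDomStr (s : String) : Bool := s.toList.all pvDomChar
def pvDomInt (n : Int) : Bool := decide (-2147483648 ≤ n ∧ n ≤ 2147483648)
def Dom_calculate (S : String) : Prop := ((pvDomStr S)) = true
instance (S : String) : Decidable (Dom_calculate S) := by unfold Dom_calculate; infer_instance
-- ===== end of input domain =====

-- B replaces A's two passes and its list of per-index prefix-count dicts by one pass with two
-- running counters (simpler, O(1) extra space instead of the table).

-- ===== PORT A =====
-- first loop: builds SSS, the list of prefix-count dicts, index by index
def calcLoop1 (SSS : List (PySem.Dict String Int)) (idx : Int) : List Char → List (PySem.Dict String Int)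
  | [] => SSS
  | v :: rest =>
    let obj : PySem.Dict String Int :=
      if idx == 0 then
        if v == 'W' then PySem.Dict.ofList [("W", (1 : Int)), ("E", 0)]
        else PySem.Dict.ofList [("E", (1 : Int)), ("W", 0)]
      else
        -- SSS[index-1] and d["W"]/d["E"] always succeed in A; getD totalises the same lookups
        let prev := (PySem.List.pyGet? SSS (idx - 1)).getD PySem.Dict.empty
        let prevW := (prev.get? "W").getD 0
        let prevE := (prev.get? "E").getD 0
        if v == 'W' then PySem.Dict.ofList [("W", prevW + 1), ("E", prevE)]
        else PySem.Dict.ofList [("E", prevE + 1), ("W", prevW)]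
    calcLoop1 (SSS ++ [obj]) (idx + 1) rest

-- second loop: folds the minimum over the table
def calcLoop2 (totalENum : Int) (SSS : List (PySem.Dict String Int)) (resVal : Int) (idx : Int) :
    List Char → Int
  | [] => resVal
  | v :: rest =>
    let d := (PySem.List.pyGet? SSS idx).getD PySem.Dict.empty
    let dW := (d.get? "W").getD 0
    let dE := (d.get? "E").getD 0
    let resVal' :=
      if v == 'W' then min resVal (dW - 1 + totalENum - dE)
      else min resVal (dW + totalENum - dE)
    calcLoop2 totalENum SSS resVal' (idx + 1) rest

def calculate (S : String) : Int :=
  let totalENum : Int := PySem.Str.count S "E"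
  let SSS := calcLoop1 [] 0 S.toList
  calcLoop2 totalENum SSS (PySem.Str.len S) 0 S.toList

-- ===== PORT B =====
def calcLoopB (totalE w e res : Int) : List Char → Int
  | [] => res
  | ch :: rest =>
    if ch == 'W' then
      let w' := w + 1
      calcLoopB totalE w' e (min res (w' - 1 + totalE - e)) rest
    else
      let e' := e + 1
      calcLoopB totalE w e' (min res (w + totalE - e')) rest

def calculate_alt (S : String) : Int :=
  let totalE : Int := PySem.Str.count S "E"
  calcLoopB totalE 0 0 (PySem.Str.len S) S.toList

-- ===== PRECONDITION & SPEC =====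
def Spec_calculate (S : String) (out : Int) : Prop := out = calculate_alt S
instance (S : String) (out : Int) : Decidable (Spec_calculate S out) := by unfold Spec_calculate; infer_instance

-- ===== CLAIM (what is proved, stated in full; the proofs are below) =====
def Claim_equal_calculate : Prop := ∀ (S : String), Dom_calculate S → Spec_calculate S (calculate S)

-- ===== LEMMAS AND PROOFS =====

-- the table A's first loop builds, expressed as a structural recursion on the string
def mkTbl (w e : Int) : List Char → List (PySem.Dict String Int)
  | [] => []
  | c :: t =>
    if c == 'W' then PySem.Dict.ofList [("W", w + 1), ("E", e)] :: mkTbl (w + 1) e t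
    else PySem.Dict.ofList [("E", e + 1), ("W", w)] :: mkTbl w (e + 1) t

theorem getWE_dictW (a b : Int) :
    (PySem.Dict.ofList [("W", a), ("E", b)]).get? "W" = some a ∧
    (PySem.Dict.ofList [("W", a), ("E", b)]).get? "E" = some b := by
  constructor <;> rfl

theorem getWE_dictE (a b : Int) :
    (PySem.Dict.ofList [("E", b), ("W", a)]).get? "W" = some a ∧
    (PySem.Dict.ofList [("E", b), ("W", a)]).get? "E" = some b := by
  constructor <;> rfl

theorem loop1_inv (l : List Char) :
    ∀ (pre : List (PySem.Dict String Int)) (d : PySem.Dict String Int) (w e : Int),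
      d.get? "W" = some w → d.get? "E" = some e →
      calcLoop1 (pre ++ [d]) ((pre.length + 1 : Nat) : Int) l = (pre ++ [d]) ++ mkTbl w e l := by
  induction l with
  | nil => intro pre d w e _ _; simp [calcLoop1, mkTbl]
  | cons c t ih =>
    intro pre d w e hW hE
    have hne : (((pre.length + 1 : Nat) : Int) == 0) = false := by
      simp only [beq_eq_false_iff_ne, ne_eq]; push_cast; omega
    have hidx : ((pre.length + 1 : Nat) : Int) - 1 = (pre.length : Int) := by push_cast; ring
    simp only [calcLoop1, hne, Bool.false_eq_true, if_false, hidx,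
      PySem.List.pyGet?_append_length, Option.getD_some, hW, hE]
    by_cases hc : (c == 'W') = true
    · simp only [hc, if_true, mkTbl]
      have := ih (pre ++ [d]) (PySem.Dict.ofList [("W", w + 1), ("E", e)]) (w + 1) e
        (getWE_dictW (w + 1) e).1 (getWE_dictW (w + 1) e).2
      have hlen : ((pre ++ [d]).length + 1 : Nat) = pre.length + 1 + 1 := by simp
      rw [hlen] at this
      push_cast at this ⊢
      simpa [List.append_assoc] using this
    · simp only [hc, mkTbl]
      have := ih (pre ++ [d]) (PySem.Dict.ofList [("E", e + 1), ("W", w)]) w (e + 1)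
        (getWE_dictE w (e + 1)).1 (getWE_dictE w (e + 1)).2
      have hlen : ((pre ++ [d]).length + 1 : Nat) = pre.length + 1 + 1 := by simp
      rw [hlen] at this
      push_cast at this ⊢
      simpa [List.append_assoc] using this

theorem loop1_eq_mkTbl (l : List Char) : calcLoop1 [] 0 l = mkTbl 0 0 l := by
  cases l with
  | nil => rfl
  | cons c t =>
    by_cases hc : (c == 'W') = true
    · simp only [calcLoop1, mkTbl, hc, if_true]
      have := loop1_inv t [] (PySem.Dict.ofList [("W", (1 : Int)), ("E", 0)]) 1 0
        (getWE_dictW 1 0).1 (getWE_dictW 1 0).2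
      simp only [List.nil_append, List.length_nil] at this ⊢
      norm_num at this ⊢
      convert this using 3
    · simp only [calcLoop1, mkTbl, hc]
      have := loop1_inv t [] (PySem.Dict.ofList [("E", (1 : Int)), ("W", 0)]) 0 1
        (getWE_dictE 0 1).1 (getWE_dictE 0 1).2
      simp only [List.nil_append, List.length_nil] at this ⊢
      norm_num at this ⊢
      convert this using 3

theorem loop2_eq_loopB (l : List Char) :
    ∀ (pre : List (PySem.Dict String Int)) (w e res totalE : Int),
      calcLoop2 totalE (pre ++ mkTbl w e l) res ((pre.length : Nat) : Int) l
        = calcLoopB totalE w e res l := by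
  induction l with
  | nil => intro pre w e res totalE; simp [calcLoop2, calcLoopB]
  | cons c t ih =>
    intro pre w e res totalE
    by_cases hc : (c == 'W') = true
    · simp only [mkTbl, hc, if_true, calcLoop2, calcLoopB,
        PySem.List.pyGet?_append_length, Option.getD_some,
        (getWE_dictW (w + 1) e).1, (getWE_dictW (w + 1) e).2]
      have := ih (pre ++ [PySem.Dict.ofList [("W", w + 1), ("E", e)]]) (w + 1) e
        (min res (w + 1 - 1 + totalE - e)) totalE
      simp only [List.length_append, List.length_singleton] at this
      push_cast at this ⊢
      simpa [List.append_assoc] using this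
    · simp only [mkTbl, hc, Bool.false_eq_true, if_false, calcLoop2, calcLoopB,
        PySem.List.pyGet?_append_length, Option.getD_some,
        (getWE_dictE w (e + 1)).1, (getWE_dictE w (e + 1)).2]
      have := ih (pre ++ [PySem.Dict.ofList [("E", e + 1), ("W", w)]]) w (e + 1)
        (min res (w + totalE - (e + 1))) totalE
      simp only [List.length_append, List.length_singleton] at this
      push_cast at this ⊢
      simpa [List.append_assoc] using this

-- ===== VERDICT (by name: the statement is the Claim_ definition above) =====
theorem calculate_spec : Claim_equal_calculate := by
  intro S _
  unfold Spec_calculate calculate calculate_alt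
  rw [loop1_eq_mkTbl]
  have := loop2_eq_loopB S.toList [] 0 0 (PySem.Str.len S) (PySem.Str.count S "E")
  simpa using this
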